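-- pv_equiv track=rewrite | github.com/danpla/dpfontbaker | tools/draw-text.py | get_image_size_for_text
-- ===== SOURCE A (Python) =====
-- REPLACEMENT_CHARACTER = 0xfffd
--
-- def lookup_glyph(cp, glyph_lookup):
--     for try_cp in (cp, REPLACEMENT_CHARACTER, ord('?')):
--         glyph = glyph_lookup.get(try_cp)
--         if glyph is not None:
--             return glyph
--
--     return None
--
-- def get_image_size_for_text(text, font, glyph_lookup, kerning_lookup):
--     num_lines = 1
--     max_w = 0
--     x = 0
--     prev_cp = 0
--     for cp in (ord(c) for c in text):
--         if cp == ord('\n'):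
--             if max_w < x:
--                 max_w = x
--
--             x = 0
--             prev_cp = 0
--             num_lines += 1
--
--             continue
--
--         glyph = lookup_glyph(cp, glyph_lookup)
--         if glyph is None:
--             prev_cp = 0
--             continue
--
--         x += kerning_lookup.get((prev_cp, cp), 0)
--         prev_cp = cp
--         x += glyph['advance']
--
--     if max_w < x:
--         max_w = x
--
--     return max_w, num_lines * font['metrics']['lineHeight']
-- ===== SOURCE B (Python) =====
-- REPLACEMENT_CHARACTER = 0xfffd
--
-- def lookup_glyph(cp, glyph_lookup):
--     for try_cp in (cp, REPLACEMENT_CHARACTER, ord('?')):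
--         glyph = glyph_lookup.get(try_cp)
--         if glyph is not None:
--             return glyph
--     return None
--
-- def _line_width(line, glyph_lookup, kerning_lookup):
--     x = 0
--     prev_cp = 0
--     for c in line:
--         cp = ord(c)
--         glyph = lookup_glyph(cp, glyph_lookup)
--         if glyph is None:
--             prev_cp = 0
--             continue
--         x += kerning_lookup.get((prev_cp, cp), 0) + glyph['advance']
--         prev_cp = cp
--     return x
--
-- def get_image_size_for_text(text, font, glyph_lookup, kerning_lookup):
--     lines = text.split('\n')
--     max_w = 0
--     for line in lines:
--         w = _line_width(line, glyph_lookup, kerning_lookup)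
--         if w > max_w:
--             max_w = w
--     return max_w, len(lines) * font['metrics']['lineHeight']
-- ===== Notes on version B (the rewrite author's own statement) =====
-- stated objective: alternative
-- what changed: Replaces A's single flat scan with inline newline-handling state resets by splitting the text into lines and computing each line's width with a per-line helper, taking the running max over whole lines and deriving the line count from the split.
import Mathlib
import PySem

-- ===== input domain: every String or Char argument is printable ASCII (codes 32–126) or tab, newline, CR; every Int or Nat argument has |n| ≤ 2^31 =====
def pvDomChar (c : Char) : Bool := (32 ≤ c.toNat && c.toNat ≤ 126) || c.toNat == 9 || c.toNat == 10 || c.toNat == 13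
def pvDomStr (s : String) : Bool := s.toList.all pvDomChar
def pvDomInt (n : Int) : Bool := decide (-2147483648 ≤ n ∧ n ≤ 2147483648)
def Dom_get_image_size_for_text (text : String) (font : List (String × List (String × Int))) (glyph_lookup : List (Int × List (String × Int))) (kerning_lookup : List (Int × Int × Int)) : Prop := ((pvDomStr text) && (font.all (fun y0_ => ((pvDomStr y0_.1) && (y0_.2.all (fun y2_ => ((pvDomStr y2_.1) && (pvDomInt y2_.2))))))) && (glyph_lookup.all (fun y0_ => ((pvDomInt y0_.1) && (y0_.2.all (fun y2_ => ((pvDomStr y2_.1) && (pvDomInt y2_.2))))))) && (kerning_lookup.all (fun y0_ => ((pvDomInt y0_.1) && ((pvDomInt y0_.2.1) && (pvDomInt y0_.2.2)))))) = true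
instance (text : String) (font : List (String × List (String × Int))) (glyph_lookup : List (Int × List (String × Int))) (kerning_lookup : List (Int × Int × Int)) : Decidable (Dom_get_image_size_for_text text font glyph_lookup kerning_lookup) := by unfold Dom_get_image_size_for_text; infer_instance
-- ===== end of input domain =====

-- B replaces A's single flat scan (with inline newline resets) by a per-line width helper over the
-- pre-split lines plus a running max over whole lines; same cost, alternative decomposition.

-- ===== PORT A =====
-- lookup_glyph: tries cp, then REPLACEMENT_CHARACTER (0xfffd), then ord('?') = 63
def lookupGlyph (glyph_lookup : List (Int × List (String × Int))) (cp : Int) : Option (List (String × Int)) :=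
  match (PySem.Dict.mk glyph_lookup).get? cp with
  | some g => some g
  | none =>
    match (PySem.Dict.mk glyph_lookup).get? 65533 with
    | some g => some g
    | none => (PySem.Dict.mk glyph_lookup).get? 63

-- kerning_lookup.get((prev_cp, cp), 0): a dict keyed by the pair, entries stored as (p, c, v)
def kernGet (kerning_lookup : List (Int × Int × Int)) (p : Int) (c : Int) : Int :=
  match kerning_lookup with
  | [] => 0
  | (a, b, v) :: rest => if a = p ∧ b = c then v else kernGet rest p c

-- one iteration of A's flat loop; state = (num_lines, max_w, x, prev_cp).
-- glyph['advance'] is (PySem.Dict.mk g).getD "advance" 0: Pre_ guarantees the key is present (Python raises KeyError otherwise).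
def stepA (glyph_lookup : List (Int × List (String × Int))) (kerning_lookup : List (Int × Int × Int))
    (s : Int × Int × Int × Int) (c : Char) : Int × Int × Int × Int :=
  if c = '\n' then
    (s.1 + 1, if s.2.1 < s.2.2.1 then s.2.2.1 else s.2.1, 0, 0)
  else
    let cp : Int := c.toNat
    match lookupGlyph glyph_lookup cp with
    | none => (s.1, s.2.1, s.2.2.1, 0)
    | some g => (s.1, s.2.1, s.2.2.1 + kernGet kerning_lookup s.2.2.2 cp + (PySem.Dict.mk g).getD "advance" 0, cp)

def get_image_size_for_text (text : String) (font : List (String × List (String × Int))) (glyph_lookup : List (Int × List (String × Int))) (kerning_lookup : List (Int × Int × Int)) : Int × Int :=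
  let s := text.toList.foldl (stepA glyph_lookup kerning_lookup) (1, 0, 0, 0)
  ((if s.2.1 < s.2.2.1 then s.2.2.1 else s.2.1),
   s.1 * (PySem.Dict.mk ((PySem.Dict.mk font).getD "metrics" [])).getD "lineHeight" 0)

-- ===== PORT B =====
-- one iteration of B's per-line loop; state = (x, prev_cp)
def stepB (glyph_lookup : List (Int × List (String × Int))) (kerning_lookup : List (Int × Int × Int))
    (s : Int × Int) (c : Char) : Int × Int :=
  let cp : Int := c.toNat
  match lookupGlyph glyph_lookup cp with
  | none => (s.1, 0)
  | some g => (s.1 + kernGet kerning_lookup s.2 cp + (PySem.Dict.mk g).getD "advance" 0, cp)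

def lineWidth (glyph_lookup : List (Int × List (String × Int))) (kerning_lookup : List (Int × Int × Int))
    (line : List Char) : Int :=
  (line.foldl (stepB glyph_lookup kerning_lookup) (0, 0)).1

-- text.split('\n') is List.splitOn '\n' on the characters (exact for a one-character separator)
def get_image_size_for_text_alt (text : String) (font : List (String × List (String × Int))) (glyph_lookup : List (Int × List (String × Int))) (kerning_lookup : List (Int × Int × Int)) : Int × Int :=
  let lines := text.toList.splitOn '\n'
  let mw := lines.foldl (fun m l => let w := lineWidth glyph_lookup kerning_lookup l; if m < w then w else m) 0
  (mw, (lines.length : Int) * (PySem.Dict.mk ((PySem.Dict.mk font).getD "metrics" [])).getD "lineHeight" 0)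

-- ===== PRECONDITION & SPEC =====
-- Pre_ excludes exactly the inputs on which the Python raises KeyError: a font without
-- metrics.lineHeight, or a text character whose looked-up glyph dict lacks the 'advance' key.
-- advOk: every non-newline character's looked-up glyph (if any) carries the 'advance' key.
def advOk (gl : List (Int × List (String × Int))) : List Char → Bool
  | [] => true
  | c :: cs =>
    (if c = '\n' then true
     else match lookupGlyph gl (c.toNat : Int) with
          | none => true
          | some g => ((PySem.Dict.mk g).get? "advance").isSome) && advOk gl cs

def Pre_get_image_size_for_text (text : String) (font : List (String × List (String × Int))) (glyph_lookup : List (Int × List (String × Int))) (kerning_lookup : List (Int × Int × Int)) : Prop :=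
  (((PySem.Dict.mk font).get? "metrics").bind (fun m => (PySem.Dict.mk m).get? "lineHeight")).isSome = true ∧
  advOk glyph_lookup text.toList = true
instance (text : String) (font : List (String × List (String × Int))) (glyph_lookup : List (Int × List (String × Int))) (kerning_lookup : List (Int × Int × Int)) : Decidable (Pre_get_image_size_for_text text font glyph_lookup kerning_lookup) := by unfold Pre_get_image_size_for_text; infer_instance

def pvWitness_get_image_size_for_text : String × (List (String × List (String × Int))) × (List (Int × List (String × Int))) × (List (Int × Int × Int)) :=
  ("ab\nc", [("metrics", [("lineHeight", 7)])],
   [(97, [("advance", 3)]), (98, [("advance", 4)]), (99, [("advance", 5)])],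
   [(97, 98, 1)])

def Spec_get_image_size_for_text (text : String) (font : List (String × List (String × Int))) (glyph_lookup : List (Int × List (String × Int))) (kerning_lookup : List (Int × Int × Int)) (out : Int × Int) : Prop := out = get_image_size_for_text_alt text font glyph_lookup kerning_lookup
instance (text : String) (font : List (String × List (String × Int))) (glyph_lookup : List (Int × List (String × Int))) (kerning_lookup : List (Int × Int × Int)) (out : Int × Int) : Decidable (Spec_get_image_size_for_text text font glyph_lookup kerning_lookup out) := by unfold Spec_get_image_size_for_text; infer_instance

-- ===== CLAIM (what is proved, stated in full; the proofs are below) =====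
def Claim_equal_get_image_size_for_text : Prop := ∀ (text : String) (font : List (String × List (String × Int))) (glyph_lookup : List (Int × List (String × Int))) (kerning_lookup : List (Int × Int × Int)), Dom_get_image_size_for_text text font glyph_lookup kerning_lookup → Pre_get_image_size_for_text text font glyph_lookup kerning_lookup → Spec_get_image_size_for_text text font glyph_lookup kerning_lookup (get_image_size_for_text text font glyph_lookup kerning_lookup)

-- ===== LEMMAS AND PROOFS =====

-- proof-side: B's computation over an explicit list of lines, threading A's mid-line seed s
-- into the first line; state (nl, mw) as in A.
def runLines (glyph_lookup : List (Int × List (String × Int))) (kerning_lookup : List (Int × Int × Int)) :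
    List (List Char) → Int × Int → Int → Int → Int × Int
  | [], _, nl, mw => (mw, nl)
  | [l], s, nl, mw =>
    (if mw < (l.foldl (stepB glyph_lookup kerning_lookup) s).1
     then (l.foldl (stepB glyph_lookup kerning_lookup) s).1 else mw, nl)
  | l :: l' :: ls, s, nl, mw =>
    runLines glyph_lookup kerning_lookup (l' :: ls) (0, 0) (nl + 1)
      (if mw < (l.foldl (stepB glyph_lookup kerning_lookup) s).1
       then (l.foldl (stepB glyph_lookup kerning_lookup) s).1 else mw)

lemma splitOn_nl_cons (c : Char) (cs : List Char) :
    (c :: cs).splitOn '\n' =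
      if c = '\n' then [] :: cs.splitOn '\n' else (cs.splitOn '\n').modifyHead (List.cons c) := by
  simp [List.splitOn, List.splitOnP_cons, beq_iff_eq]

lemma splitOn_ne_nil (cs : List Char) : cs.splitOn '\n' ≠ [] :=
  List.splitOnP_ne_nil _ cs

lemma stepA_of_ne (gl : List (Int × List (String × Int))) (kl : List (Int × Int × Int))
    (nl mw : Int) (s : Int × Int) (c : Char) (hc : c ≠ '\n') :
    stepA gl kl (nl, mw, s.1, s.2) c = (nl, mw, stepB gl kl s c) := by
  simp only [stepA, stepB, if_neg hc]
  cases lookupGlyph gl (c.toNat : Int) <;> rfl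

lemma runLines_cons_head (gl : List (Int × List (String × Int))) (kl : List (Int × Int × Int))
    (c : Char) (h : List Char) (t : List (List Char)) (s : Int × Int) (nl mw : Int) :
    runLines gl kl ((c :: h) :: t) s nl mw = runLines gl kl (h :: t) (stepB gl kl s c) nl mw := by
  cases t <;> simp [runLines, List.foldl_cons]

lemma foldA_eq_runLines (gl : List (Int × List (String × Int))) (kl : List (Int × Int × Int))
    (cs : List Char) : ∀ (s : Int × Int) (nl mw : Int),
    (let t := cs.foldl (stepA gl kl) (nl, mw, s.1, s.2)
     ((if t.2.1 < t.2.2.1 then t.2.2.1 else t.2.1), t.1)) =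
      runLines gl kl (cs.splitOn '\n') s nl mw := by
  induction cs with
  | nil => intro s nl mw; simp [List.splitOn_nil, runLines]
  | cons c cs ih =>
    intro s nl mw
    rw [splitOn_nl_cons]
    by_cases hc : c = '\n'
    · subst hc
      rw [if_pos rfl]; simp only [List.foldl_cons]
      
      have hstep : stepA gl kl (nl, mw, s.1, s.2) '\n' =
          (nl + 1, (if mw < s.1 then s.1 else mw), (0 : Int), (0 : Int)) := by
        simp [stepA]
      rw [hstep]
      have := ih ((0 : Int), (0 : Int)) (nl + 1) (if mw < s.1 then s.1 else mw)
      simp only at this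
      rw [this]
      obtain ⟨h, t, ht⟩ := List.exists_cons_of_ne_nil (splitOn_ne_nil cs)
      rw [ht]
      cases t <;> simp [runLines]
    · rw [if_neg hc]; simp only [List.foldl_cons]
      rw [stepA_of_ne gl kl nl mw s c hc]
      have := ih (stepB gl kl s c) nl mw
      simp only at this
      rw [this]
      obtain ⟨h, t, ht⟩ := List.exists_cons_of_ne_nil (splitOn_ne_nil cs)
      rw [ht, List.modifyHead_cons, runLines_cons_head]

lemma runLines_eq_fold (gl : List (Int × List (String × Int))) (kl : List (Int × Int × Int))
    (ls : List (List Char)) : ∀ (l : List Char) (s : Int × Int) (nl mw : Int),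
    runLines gl kl (l :: ls) s nl mw =
      (ls.foldl (fun m l' => let w := lineWidth gl kl l'; if m < w then w else m)
         (if mw < (l.foldl (stepB gl kl) s).1 then (l.foldl (stepB gl kl) s).1 else mw),
       nl + (ls.length : Int)) := by
  induction ls with
  | nil => intro l s nl mw; simp [runLines]
  | cons l' ls ih =>
    intro l s nl mw
    rw [show runLines gl kl (l :: l' :: ls) s nl mw =
        runLines gl kl (l' :: ls) (0, 0) (nl + 1)
          (if mw < (l.foldl (stepB gl kl) s).1 then (l.foldl (stepB gl kl) s).1 else mw) from rfl]
    rw [ih]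
    simp only [List.foldl_cons, lineWidth, List.length_cons, Prod.mk.injEq]
    exact ⟨trivial, by push_cast; ring⟩

-- ===== VERDICT (by name: the statement is the Claim_ definition above) =====
theorem get_image_size_for_text_spec : Claim_equal_get_image_size_for_text := by
  intro text font gl kl _ _
  unfold Spec_get_image_size_for_text get_image_size_for_text get_image_size_for_text_alt
  obtain ⟨h, t, ht⟩ := List.exists_cons_of_ne_nil (splitOn_ne_nil text.toList)
  have hA := foldA_eq_runLines gl kl text.toList ((0 : Int), (0 : Int)) 1 0
  simp only at hA
  have hB := runLines_eq_fold gl kl t h ((0 : Int), (0 : Int)) 1 0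
  rw [ht] at hA
  rw [hB] at hA
  simp only [ht, List.foldl_cons, List.length_cons]
  have h1 : (text.toList.foldl (stepA gl kl) (1, 0, 0, 0)) =
      (text.toList.foldl (stepA gl kl) (1, 0, ((0:Int),(0:Int)).1, ((0:Int),(0:Int)).2)) := rfl
  rw [Prod.ext_iff] at hA ⊢
  simp only at hA ⊢
  refine ⟨hA.1.trans ?_, ?_⟩
  · rfl
  · rw [hA.2]; push_cast; ring
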